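-- pv_equiv track=rewrite | github.com/jeremyzanella0/2025-2026 | vz_mk14.py | _legend_bins_for_zone
-- ===== SOURCE A (Python) =====
-- def _zone_tier(zone_id: int) -> str:
--     if zone_id in (1, 2, 3, 4):
--         return "close"
--     if zone_id in (5, 6, 7, 8, 9):
--         return "mid"
--     return "three"
--
-- def _rgba_for_zone(zone_id: int, attempts: int, pct: float) -> str:
--     if attempts == 0:
--         return "rgba(255,255,255,1.0)"
--     tier = _zone_tier(zone_id)
--     BLUE   = "rgba(0,102,204,0.95)"
--     YELLOW = "rgba(255,204,0,0.95)"
--     RED    = "rgba(204,0,0,0.95)"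
--     if tier == "close":
--         if 0.0 <= pct <= 50.0:   return BLUE
--         if 51.0 <= pct <= 60.0:  return YELLOW
--         return RED
--     elif tier == "mid":
--         if 0.0 <= pct <= 35.0:   return BLUE
--         if 36.0 <= pct <= 45.0:  return YELLOW
--         return RED
--     else:
--         if 0.0 <= pct <= 25.0:   return BLUE
--         if 26.0 <= pct <= 35.0:  return YELLOW
--         return RED
--
-- def _legend_bins_for_zone(zid: int):
--     last = None; cuts = []
--     for p in range(0, 101):
--         col = str(_rgba_for_zone(zid, attempts=1, pct=p))
--         if last is None: last = col
--         elif col != last: cuts.append(p); last = col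
--     def fmt(a,b):
--         if a<0: a=0
--         if b>100: b=100
--         return f"{a}–{b}%"
--     if len(cuts) >= 2:
--         t1, t2 = cuts[0], cuts[1]
--         return (fmt(0, max(t1-1,0)), fmt(t1, max(t2-1,t1)), f"{t2}%+")
--     if len(cuts) == 1:
--         t1 = cuts[0]; return (fmt(0, max(t1-1,0)), f"{t1}%+", "—")
--     return ("0–100%", "—", "—")
-- ===== SOURCE B (Python) =====
-- def _legend_bins_for_zone(zid: int):
--     # Direct threshold lookup by tier: no 0..100 color scan.
--     if zid in (1, 2, 3, 4):
--         t1, t2 = 51, 61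
--     elif zid in (5, 6, 7, 8, 9):
--         t1, t2 = 36, 46
--     else:
--         t1, t2 = 26, 36
--     return (f"0\u2013{t1-1}%", f"{t1}\u2013{t2-1}%", f"{t2}%+")
-- ===== Notes on version B (the rewrite author's own statement) =====
-- stated objective: simpler
-- what changed: Replaces the 0..100 color scan with change-detection and a cuts list by a direct tier-to-thresholds lookup that formats the three labels immediately.
import Mathlib
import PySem

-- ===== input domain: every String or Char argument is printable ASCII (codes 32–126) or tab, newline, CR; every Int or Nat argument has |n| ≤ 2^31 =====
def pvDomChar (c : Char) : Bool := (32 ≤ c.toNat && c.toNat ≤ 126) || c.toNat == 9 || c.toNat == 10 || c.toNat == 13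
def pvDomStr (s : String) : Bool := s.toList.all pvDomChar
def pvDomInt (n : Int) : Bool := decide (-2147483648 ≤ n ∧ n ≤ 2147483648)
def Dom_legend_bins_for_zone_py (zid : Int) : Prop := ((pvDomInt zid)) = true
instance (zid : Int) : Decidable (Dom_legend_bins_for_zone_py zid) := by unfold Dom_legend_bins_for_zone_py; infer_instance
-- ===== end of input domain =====

-- B replaces A's 0..100 color scan + change detection by a direct tier→thresholds lookup (simpler).

-- ===== PORT A =====
def zone_tier_py (zone_id : Int) : String :=
  if zone_id = 1 ∨ zone_id = 2 ∨ zone_id = 3 ∨ zone_id = 4 then "close"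
  else if zone_id = 5 ∨ zone_id = 6 ∨ zone_id = 7 ∨ zone_id = 8 ∨ zone_id = 9 then "mid"
  else "three"

-- pct is only ever called with the integers 0..100 here; ported as Int (the comparisons
-- with the float literals 0.0, 25.0, … are exact on integer arguments).
def rgba_for_zone_py (zone_id : Int) (attempts : Int) (pct : Int) : String :=
  if attempts = 0 then "rgba(255,255,255,1.0)"
  else
    let tier := zone_tier_py zone_id
    let BLUE := "rgba(0,102,204,0.95)"
    let YELLOW := "rgba(255,204,0,0.95)"
    let RED := "rgba(204,0,0,0.95)"
    if tier = "close" then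
      if 0 ≤ pct ∧ pct ≤ 50 then BLUE
      else if 51 ≤ pct ∧ pct ≤ 60 then YELLOW
      else RED
    else if tier = "mid" then
      if 0 ≤ pct ∧ pct ≤ 35 then BLUE
      else if 36 ≤ pct ∧ pct ≤ 45 then YELLOW
      else RED
    else
      if 0 ≤ pct ∧ pct ≤ 25 then BLUE
      else if 26 ≤ pct ∧ pct ≤ 35 then YELLOW
      else RED

def fmt_py (a b : Int) : String :=
  let a := if a < 0 then 0 else a
  let b := if b > 100 then 100 else b
  PySem.Int.toStr a ++ "–" ++ PySem.Int.toStr b ++ "%"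

-- the body of A's 'for p in range(0, 101)' loop, on state (last, cuts)
def legend_step (zid : Int) (s : Option String × List Int) (p : Int) : Option String × List Int :=
  let col := rgba_for_zone_py zid 1 p
  match s.1 with
  | none => (some col, s.2)
  | some last => if col ≠ last then (some col, s.2 ++ [p]) else (some last, s.2)

def legend_bins_for_zone_py (zid : Int) : String × String × String :=
  let st := (PySem.List.pyRange 0 101 1).foldl (legend_step zid) (none, [])
  let cuts := st.2
  match cuts with                                    -- len ≥ 2 / = 1 / = 0
  | t1 :: t2 :: _ =>
      (fmt_py 0 (max (t1 - 1) 0), fmt_py t1 (max (t2 - 1) t1), PySem.Int.toStr t2 ++ "%+")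
  | [t1] => (fmt_py 0 (max (t1 - 1) 0), PySem.Int.toStr t1 ++ "%+", "—")
  | [] => ("0–100%", "—", "—")

-- ===== PORT B =====
def legend_bins_for_zone_py_alt (zid : Int) : String × String × String :=
  let tt : Int × Int :=
    if zid = 1 ∨ zid = 2 ∨ zid = 3 ∨ zid = 4 then (51, 61)
    else if zid = 5 ∨ zid = 6 ∨ zid = 7 ∨ zid = 8 ∨ zid = 9 then (36, 46)
    else (26, 36)
  ("0–" ++ PySem.Int.toStr (tt.1 - 1) ++ "%",
   PySem.Int.toStr tt.1 ++ "–" ++ PySem.Int.toStr (tt.2 - 1) ++ "%",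
   PySem.Int.toStr tt.2 ++ "%+")

-- ===== PRECONDITION & SPEC =====
def Spec_legend_bins_for_zone_py (zid : Int) (out : String × String × String) : Prop := out = legend_bins_for_zone_py_alt zid
instance (zid : Int) (out : String × String × String) : Decidable (Spec_legend_bins_for_zone_py zid out) := by unfold Spec_legend_bins_for_zone_py; infer_instance

-- ===== CLAIM (what is proved, stated in full; the proofs are below) =====
def Claim_equal_legend_bins_for_zone_py : Prop := ∀ (zid : Int), Dom_legend_bins_for_zone_py zid → Spec_legend_bins_for_zone_py zid (legend_bins_for_zone_py zid)

-- ===== LEMMAS AND PROOFS =====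
set_option maxHeartbeats 2000000 in
theorem rgba_three (zid : Int)
    (h1 : ¬(zid = 1 ∨ zid = 2 ∨ zid = 3 ∨ zid = 4))
    (h2 : ¬(zid = 5 ∨ zid = 6 ∨ zid = 7 ∨ zid = 8 ∨ zid = 9)) (a p : Int) :
    rgba_for_zone_py zid a p = rgba_for_zone_py 0 a p := by
  simp [rgba_for_zone_py, zone_tier_py, h1, h2]

set_option maxHeartbeats 4000000 in
set_option maxRecDepth 100000 in
theorem legend_three (zid : Int)
    (h1 : ¬(zid = 1 ∨ zid = 2 ∨ zid = 3 ∨ zid = 4))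
    (h2 : ¬(zid = 5 ∨ zid = 6 ∨ zid = 7 ∨ zid = 8 ∨ zid = 9)) :
    legend_bins_for_zone_py zid = legend_bins_for_zone_py 0 := by
  have hstep : legend_step zid = legend_step 0 := by
    funext s p
    unfold legend_step
    rw [rgba_three zid h1 h2]
  unfold legend_bins_for_zone_py
  rw [hstep]

-- ===== VERDICT (by name: the statement is the Claim_ definition above) =====
set_option maxHeartbeats 4000000 in
set_option maxRecDepth 100000 in
theorem legend_bins_for_zone_py_spec : Claim_equal_legend_bins_for_zone_py := by
  intro zid _
  unfold Spec_legend_bins_for_zone_py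
  by_cases h1 : zid = 1 ∨ zid = 2 ∨ zid = 3 ∨ zid = 4
  · rcases h1 with h | h | h | h <;> subst h <;> decide
  · by_cases h2 : zid = 5 ∨ zid = 6 ∨ zid = 7 ∨ zid = 8 ∨ zid = 9
    · rcases h2 with h | h | h | h | h <;> subst h <;> decide
    · rw [legend_three zid h1 h2]
      simp only [legend_bins_for_zone_py_alt, if_neg h1, if_neg h2]
      decide
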